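-- pv_equiv track=rewrite | github.com/harsha-0907/LeetCode | potd/parsingBoolean.py | parseBoolean
-- ===== SOURCE A (Python) =====
-- def parseBoolean(expression):
--     def evaluateExpression(expr, op):
--         exp1 = True if expr[0] == 't' else False
--         if op == '!':
--             return 't' if expr[0] == 'f' else 'f'
--         for i in expr[1:]:
--             if i == 't':
--                 exp = True
--             else:
--                 exp = False
--             if op == '|':
--                 exp1 = exp or exp1
--             elif op == '&':
--                 exp1 = exp and exp1
--         return 't' if exp1 else 'f'
--
--     stack = []
--     for ch in expression:
--         if ch == ')':
--             expr = ""
--             for e in range(len(stack)):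
--                 ele = stack.pop()
--                 if ele == "!" or ele == "|" or ele == "&":
--                     stack.append(evaluateExpression(expr, ele))
--                     break
--                 elif ele == '(':
--                     continue
--                 else:
--                     expr += ele
--         elif ch == ',':
--             continue
--         else:
--             stack.append(ch)
--
--     return True if stack[-1] == 't' else False
-- ===== SOURCE B (Python) =====
-- def parseBoolean(expression):
--     # Single pass: for each open operator group keep just the summary needed to
--     # evaluate it -- (operator, last operand char, all operands 't', any operand 't') --
--     # and track the character currently on top of the evaluation for the final answer.
--     groups = []
--     last = ''
--     for ch in expression:
--         if ch == ',':
--             continue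
--         if ch in '!&|':
--             groups.append((ch, '', True, False))
--             last = ch
--         elif ch == ')':
--             if groups:
--                 op, arg, all_t, any_t = groups.pop()
--                 if op == '!':
--                     res = 't' if arg == 'f' else 'f'
--                 elif op == '&':
--                     res = 't' if all_t else 'f'
--                 else:
--                     res = 't' if any_t else 'f'
--                 if groups:
--                     op2, _, all2, any2 = groups[-1]
--                     groups[-1] = (op2, res, all2 and res == 't', any2 or res == 't')
--                 last = res
--         elif ch == '(':
--             last = ch
--         else:
--             if groups:
--                 op2, _, all2, any2 = groups[-1]
--                 groups[-1] = (op2, ch, all2 and ch == 't', any2 or ch == 't')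
--             last = ch
--     return last == 't'
-- ===== Notes on version B (the rewrite author's own statement) =====
-- stated objective: alternative
-- what changed: Replaced A's flat character stack, whose ')' handler pops and re-scans elements one by one and whose evaluateExpression re-reads all the popped operand characters, by a single left-to-right pass that keeps one constant-size summary per open operator group (operator, last operand char, all-'t', any-'t') plus the current top character; Pre_ excludes exactly the inputs on which A raises IndexError (B returns a value there).
import Mathlib
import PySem

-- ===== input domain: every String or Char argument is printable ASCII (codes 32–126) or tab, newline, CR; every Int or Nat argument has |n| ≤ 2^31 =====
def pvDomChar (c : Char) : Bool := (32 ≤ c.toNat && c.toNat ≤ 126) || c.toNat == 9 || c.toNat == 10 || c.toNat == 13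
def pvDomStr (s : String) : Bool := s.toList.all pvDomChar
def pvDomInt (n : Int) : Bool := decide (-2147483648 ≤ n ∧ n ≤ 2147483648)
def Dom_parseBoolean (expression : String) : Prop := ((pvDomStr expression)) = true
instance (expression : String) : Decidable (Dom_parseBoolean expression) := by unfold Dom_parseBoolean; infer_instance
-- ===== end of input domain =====

-- B replaces A's flat character stack — whose ')' handler pops and re-scans elements
-- one by one and whose evaluateExpression re-reads all the popped operand characters —
-- by a single pass keeping one constant-size summary per open operator group plus the
-- current top character; alternative algorithm, same result.

-- ===== PORT A =====
-- evaluateExpression(expr, op): 'expr' is the list of popped operand characters in pop order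
-- (so expr[0] is the first popped element), 'op' the operator character.
def pvAEval (expr : List Char) (op : Char) : Char :=
  match expr with
  | [] => if op == '&' then 't' else 'f'  -- Python raises IndexError on expr[0] here;
                                          -- unreachable under Pre_, any value would do
  | c0 :: rest =>
    if op == '!' then (if c0 == 'f' then 't' else 'f')
    else
      let exp1 := (rest.foldl (fun exp1 i =>
        let exp := i == 't'
        if op == '|' then (exp || exp1)
        else if op == '&' then (exp && exp1)
        else exp1) (c0 == 't'))
      if exp1 then 't' else 'f'

-- the inner 'for e in range(len(stack)): ele = stack.pop(); …' loop; the stack is a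
-- Lean list with its top at the head; 'expr' accumulates popped chars in pop order.
def pvAPop (n : Nat) (stack : List Char) (expr : List Char) : List Char :=
  match n, stack with
  | 0, st => st
  | _ + 1, [] => []  -- Python stack.pop() would raise; never reached since n = len(stack)
  | n + 1, ele :: st =>
    if ele == '!' || ele == '|' || ele == '&' then pvAEval expr ele :: st
    else if ele == '(' then pvAPop n st expr
    else pvAPop n st (expr ++ [ele])

def pvAStep (stack : List Char) (ch : Char) : List Char :=
  if ch == ')' then pvAPop stack.length stack []
  else if ch == ',' then stack
  else ch :: stack

-- 'return True if stack[-1] == 't' else False' (the [] arm is Python's IndexError on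
-- stack[-1]; unreachable under Pre_)
def pvAOut (stack : List Char) : Bool :=
  match stack with
  | c :: _ => c == 't'
  | [] => false

def parseBoolean (expression : String) : Bool :=
  let stack := expression.toList.foldl pvAStep []
  pvAOut stack

-- ===== PORT B =====
-- Source B's state: 'groups' is the stack of open operator groups, each summarized as
-- (operator, last operand char, all operands are 't', any operand is 't'); 'last' is
-- the character currently on top of the evaluation, kept as a List Char since the
-- Python variable is a string that starts out empty ('' = []).
def PvGroup : Type := Char × List Char × Bool × Bool

def pvBStep (st : List PvGroup × List Char) (ch : Char) : List PvGroup × List Char :=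
  match st with
  | (groups, last) =>
    if ch == ',' then (groups, last)
    else if ch == '!' || ch == '&' || ch == '|' then ((ch, [], true, false) :: groups, [ch])
    else if ch == ')' then
      match groups with
      | [] => (groups, last)
      | (op, arg, all_t, any_t) :: rest =>
        let res := if op == '!' then (if arg == ['f'] then 't' else 'f')
          else if op == '&' then (if all_t then 't' else 'f')
          else if any_t then 't' else 'f'
        match rest with
        | [] => ([], [res])
        | (op2, _, all2, any2) :: rest2 =>
          ((op2, [res], all2 && (res == 't'), any2 || (res == 't')) :: rest2, [res])
    else if ch == '(' then (groups, [ch])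
    else
      match groups with
      | [] => (groups, [ch])
      | (op2, _, all2, any2) :: rest =>
        ((op2, [ch], all2 && (ch == 't'), any2 || (ch == 't')) :: rest, [ch])

def parseBoolean_alt (expression : String) : Bool :=
  (expression.toList.foldl pvBStep ([], [])).2 == ['t']

-- ===== PRECONDITION & SPEC =====
-- Pre_ holds exactly when the Python A returns (raises no IndexError): its ')' handler
-- never evaluates an operator over an empty operand list, and the final stack is
-- nonempty. A's domain is this non-crash condition of its own stack discipline — it
-- has no static shape, so it is stated by the left-to-right scan below, which tracks
-- only, per operator-delimited stack segment, whether some character / some non-'('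
-- character was pushed (it computes no output value); 'none' marks an IndexError.
def pvPreStep (st : Option (List (Bool × Bool))) (ch : Char) : Option (List (Bool × Bool)) :=
  match st with
  | none => none
  | some fs =>
    if ch == ',' then some fs
    else if ch == '!' || ch == '&' || ch == '|' then some ((false, false) :: fs)
    else if ch == ')' then
      match fs with
      | [] => none  -- unreachable: the scan keeps one flag pair per segment
      | [_] => some [(false, false)]  -- no operator below: A's whole stack drains
      | (_, np) :: _ :: rest2 =>
        if np then some ((true, true) :: rest2) else none  -- empty operand list: expr[0] raises
    else
      match fs with
      | [] => none  -- unreachable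
      | (_, np) :: rest => some ((true, np || !(ch == '(')) :: rest)

def pvPreOk (expression : String) : Bool :=
  match expression.toList.foldl pvPreStep (some [(false, false)]) with
  | none => false
  | some [] => false
  | some ((a, _) :: rest) => !rest.isEmpty || a  -- final stack nonempty, else stack[-1] raises

def Pre_parseBoolean (expression : String) : Prop := pvPreOk expression = true
instance (expression : String) : Decidable (Pre_parseBoolean expression) := by
  unfold Pre_parseBoolean; infer_instance

def pvWitness_parseBoolean : String := "!(&(t,f,t))"

def Spec_parseBoolean (expression : String) (out : Bool) : Prop := out = parseBoolean_alt expression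
instance (expression : String) (out : Bool) : Decidable (Spec_parseBoolean expression out) := by unfold Spec_parseBoolean; infer_instance

-- ===== CLAIM (what is proved, stated in full; the proofs are below) =====
def Claim_equal_parseBoolean : Prop := ∀ (expression : String), Dom_parseBoolean expression → Pre_parseBoolean expression → Spec_parseBoolean expression (parseBoolean expression)

-- ===== LEMMAS AND PROOFS =====

-- the non-'(' characters of a stack segment, in stack (top-first) order
def pvNP (cs : List Char) : List Char := cs.filter (fun c => !(c == '('))

-- a segment of A's stack contains no operator characters
def pvNoOps (cs : List Char) : Prop := ∀ c ∈ cs, (c == '!' || c == '|' || c == '&') = false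

-- the joint invariant: B's group summaries and Pre_'s flag pairs both describe A's
-- stack, cut at the operator characters (head = top; the last flag pair is the
-- operator-free bottom segment, for which B keeps no group)
def pvInv : List PvGroup → List (Bool × Bool) → List Char → Prop
  | [], [(a, np)], s =>
      pvNoOps s ∧ a = !s.isEmpty ∧ np = !(pvNP s).isEmpty
  | (o, arg, allt, anyt) :: gs, (a, np) :: fs, s =>
      ∃ cs s', s = cs ++ o :: s' ∧ (o == '!' || o == '|' || o == '&') = true ∧ pvNoOps cs ∧
        arg = (pvNP cs).take 1 ∧ allt = (pvNP cs).all (· == 't') ∧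
        anyt = (pvNP cs).any (· == 't') ∧
        a = !cs.isEmpty ∧ np = !(pvNP cs).isEmpty ∧ pvInv gs fs s'
  | _, _, _ => False

theorem pvAEval_and (rest : List Char) (b : Bool) :
    (rest.foldl (fun exp1 i =>
        let exp := i == 't'
        if ('&' : Char) == '|' then (exp || exp1)
        else if ('&' : Char) == '&' then (exp && exp1)
        else exp1) b) = (rest.all (· == 't') && b) := by
  induction rest generalizing b with
  | nil => simp
  | cons c cs ih =>
    rw [List.foldl_cons, ih]
    simp [Bool.and_comm, Bool.and_assoc]

theorem pvAEval_or (rest : List Char) (b : Bool) :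
    (rest.foldl (fun exp1 i =>
        let exp := i == 't'
        if ('|' : Char) == '|' then (exp || exp1)
        else if ('|' : Char) == '&' then (exp && exp1)
        else exp1) b) = (rest.any (· == 't') || b) := by
  induction rest generalizing b with
  | nil => simp
  | cons c cs ih =>
    rw [List.foldl_cons, ih]
    simp [Bool.or_comm, Bool.or_assoc]

theorem pvAEval_amp' (l : List Char) :
    pvAEval l '&' = if l.all (· == 't') then 't' else 'f' := by
  cases l with
  | nil => rfl
  | cons c0 rest =>
    simp only [pvAEval]
    rw [if_neg (by decide), pvAEval_and]
    simp [Bool.and_comm]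

theorem pvAEval_bar' (l : List Char) :
    pvAEval l '|' = if l.any (· == 't') then 't' else 'f' := by
  cases l with
  | nil => rfl
  | cons c0 rest =>
    simp only [pvAEval]
    rw [if_neg (by decide), pvAEval_or]
    simp [Bool.or_comm]

theorem pvAEval_tf (l : List Char) (o : Char) : pvAEval l o = 't' ∨ pvAEval l o = 'f' := by
  cases l with
  | nil => unfold pvAEval; split_ifs <;> simp
  | cons c0 rest => unfold pvAEval; split_ifs <;> simp <;> tauto

-- popping a stack with no operator in it empties it
theorem pvAPop_drain (cs expr : List Char) (n : Nat)
    (hcs : pvNoOps cs) (hn : cs.length ≤ n) : pvAPop n cs expr = [] := by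
  induction cs generalizing expr n with
  | nil => cases n <;> rfl
  | cons c cs ih =>
    obtain ⟨m, rfl⟩ : ∃ m, n = m + 1 := ⟨n - 1, by simp at hn; omega⟩
    have hc := hcs c (by simp)
    simp only [pvAPop, hc, Bool.false_eq_true, if_false]
    by_cases hp : (c == '(') = true
    · rw [if_pos hp]
      exact ih expr m (fun x hx => hcs x (by simp [hx])) (by simp at hn; omega)
    · rw [if_neg hp]
      exact ih (expr ++ [c]) m (fun x hx => hcs x (by simp [hx])) (by simp at hn; omega)

-- popping down to the nearest operator evaluates it over the popped non-'(' chars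
theorem pvAPop_reduce (cs : List Char) (o : Char) (s' expr : List Char) (n : Nat)
    (hcs : pvNoOps cs)
    (ho : (o == '!' || o == '|' || o == '&') = true)
    (hn : cs.length + 1 ≤ n) :
    pvAPop n (cs ++ o :: s') expr = pvAEval (expr ++ pvNP cs) o :: s' := by
  induction cs generalizing expr n with
  | nil =>
    obtain ⟨m, rfl⟩ : ∃ m, n = m + 1 := ⟨n - 1, by omega⟩
    simp [pvAPop, ho, pvNP]
  | cons c cs ih =>
    obtain ⟨m, rfl⟩ : ∃ m, n = m + 1 := ⟨n - 1, by omega⟩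
    have hc := hcs c (by simp)
    simp only [List.cons_append, pvAPop, hc, Bool.false_eq_true, if_false]
    by_cases hp : (c == '(') = true
    · rw [if_pos hp]
      rw [ih expr m (fun x hx => hcs x (by simp [hx])) (by simp at hn ⊢; omega)]
      have : pvNP (c :: cs) = pvNP cs := by
        simp only [pvNP, List.filter_cons, hp]
        rfl
      rw [this]
    · rw [if_neg hp]
      rw [ih (expr ++ [c]) m (fun x hx => hcs x (by simp [hx])) (by simp at hn ⊢; omega)]
      have : pvNP (c :: cs) = c :: pvNP cs := by
        simp only [pvNP, List.filter_cons, hp]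
        rfl
      rw [this, List.append_assoc]
      rfl

theorem pvNP_cons_nopar (c : Char) (cs : List Char) (hp : (c == '(') = false) :
    pvNP (c :: cs) = c :: pvNP cs := by
  simp only [pvNP, List.filter_cons, hp]
  rfl

theorem pvNP_cons_par (cs : List Char) : pvNP ('(' :: cs) = pvNP cs := by
  simp only [pvNP, List.filter_cons]
  rfl

-- the summary-computed reduction result equals A's evaluation of the popped chars
theorem pvRes_eval (o : Char) (cs : List Char)
    (ho : (o == '!' || o == '|' || o == '&') = true)
    (hne : pvNP cs ≠ []) :
    (if o == '!' then (if (pvNP cs).take 1 == ['f'] then 't' else 'f')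
     else if o == '&' then (if (pvNP cs).all (· == 't') then 't' else 'f')
     else if (pvNP cs).any (· == 't') then 't' else 'f') = pvAEval (pvNP cs) o := by
  have ho' : o = '!' ∨ o = '|' ∨ o = '&' := by
    rcases Bool.or_eq_true_iff.1 ho with h | h
    · rcases Bool.or_eq_true_iff.1 h with h | h
      · exact Or.inl (beq_iff_eq.1 h)
      · exact Or.inr (Or.inl (beq_iff_eq.1 h))
    · exact Or.inr (Or.inr (beq_iff_eq.1 h))
  cases hl : pvNP cs with
  | nil => exact absurd hl hne
  | cons c0 r =>
    rcases ho' with rfl | rfl | rfl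
    · simp [pvAEval]
    · rw [pvAEval_bar']
      simp
    · rw [pvAEval_amp']
      simp

theorem pvPreFold_none (l : List Char) : List.foldl pvPreStep none l = none := by
  induction l with
  | nil => rfl
  | cons c r ih => exact ih

-- the flag list of the invariant is never empty
theorem pvInv_fs_ne (gs : List PvGroup) (fs : List (Bool × Bool)) (s : List Char)
    (h : pvInv gs fs s) : fs ≠ [] := by
  cases gs with
  | nil => cases fs with
    | nil => exact h.elim
    | cons f fs' => simp
  | cons g gs' =>
    obtain ⟨o, arg, allt, anyt⟩ := g
    cases fs with
    | nil => exact h.elim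
    | cons f fs' => simp

-- the value Source B computes when it closes a group
def pvBRes (o : Char) (arg : List Char) (allt anyt : Bool) : Char :=
  if o == '!' then (if arg == ['f'] then 't' else 'f')
  else if o == '&' then (if allt then 't' else 'f')
  else if anyt then 't' else 'f'

theorem pvBStep_close (o : Char) (arg : List Char) (allt anyt : Bool)
    (rest : List PvGroup) (last : List Char) :
    pvBStep ((o, arg, allt, anyt) :: rest, last) ')' =
      (match rest with
       | [] => ([], [pvBRes o arg allt anyt])
       | (op2, _, all2, any2) :: rest2 =>
         ((op2, [pvBRes o arg allt anyt], all2 && (pvBRes o arg allt anyt == 't'),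
           any2 || (pvBRes o arg allt anyt == 't')) :: rest2, [pvBRes o arg allt anyt])) := by
  cases rest with
  | nil => simp [pvBStep, pvBRes]
  | cons g rest2 => obtain ⟨o2, a2, l2, y2⟩ := g; simp [pvBStep, pvBRes]

theorem pvBStep_push (gs : List PvGroup) (last : List Char) (ch : Char)
    (h1 : (ch == ',') = false) (h2 : (ch == '!' || ch == '&' || ch == '|') = false)
    (h3 : (ch == ')') = false) :
    pvBStep (gs, last) ch =
      (if (ch == '(') = true then (gs, [ch])
       else match gs with
            | [] => (gs, [ch])
            | (op2, _, all2, any2) :: rest =>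
              ((op2, [ch], all2 && (ch == 't'), any2 || (ch == 't')) :: rest, [ch])) := by
  simp [pvBStep, h1, h2, h3]

-- one input character preserves the invariant and the top-character tracking
theorem pvStep (gs : List PvGroup) (last : List Char) (fs : List (Bool × Bool))
    (s : List Char) (ch : Char) (fs' : List (Bool × Bool))
    (hinv : pvInv gs fs s) (hlast : s ≠ [] → last = s.take 1)
    (hpre : pvPreStep (some fs) ch = some fs') :
    pvInv (pvBStep (gs, last) ch).1 fs' (pvAStep s ch) ∧
      (pvAStep s ch ≠ [] → (pvBStep (gs, last) ch).2 = (pvAStep s ch).take 1) := by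
  by_cases hcm : (ch == ',') = true
  · have hA : pvAStep s ch = s := by
      obtain rfl := beq_iff_eq.1 hcm
      simp [pvAStep]
    have hfs : fs' = fs := by
      simp only [pvPreStep, hcm, if_true] at hpre
      exact (Option.some.inj hpre).symm
    have hB : pvBStep (gs, last) ch = (gs, last) := by
      simp [pvBStep, hcm]
    rw [hA, hB, hfs]
    exact ⟨hinv, hlast⟩
  · by_cases hop : (ch == '!' || ch == '&' || ch == '|') = true
    · have hch3 : ch = '!' ∨ ch = '&' ∨ ch = '|' := by
        rcases Bool.or_eq_true_iff.1 hop with h | h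
        · rcases Bool.or_eq_true_iff.1 h with h | h
          · exact Or.inl (beq_iff_eq.1 h)
          · exact Or.inr (Or.inl (beq_iff_eq.1 h))
        · exact Or.inr (Or.inr (beq_iff_eq.1 h))
      have hA : pvAStep s ch = ch :: s := by
        rcases hch3 with rfl | rfl | rfl <;> simp [pvAStep]
      have hB : pvBStep (gs, last) ch = ((ch, [], true, false) :: gs, [ch]) := by
        simp only [pvBStep]
        rw [if_neg hcm, if_pos hop]
        rfl
      have hfs : fs' = (false, false) :: fs := by
        simp only [pvPreStep, hcm, hop] at hpre
        simp at hpre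
        exact hpre.symm
      rw [hA, hB, hfs]
      constructor
      · refine ⟨[], s, rfl, ?_, ?_, rfl, rfl, rfl, rfl, rfl, hinv⟩
        · rcases hch3 with rfl | rfl | rfl <;> decide
        · intro c hc; simp at hc
      · intro _; rfl
    · by_cases hcl : (ch == ')') = true
      · obtain rfl := beq_iff_eq.1 hcl
        have hA : pvAStep s ')' = pvAPop s.length s [] := by simp [pvAStep]
        cases gs with
        | nil =>
          cases fs with
          | nil => exact hinv.elim
          | cons f1 fs1 =>
            obtain ⟨a, np⟩ := f1
            cases fs1 with
            | cons f2 fs2 => exact hinv.elim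
            | nil =>
              obtain ⟨hno, ha, hnp⟩ := hinv
              have hfs : fs' = [(false, false)] := by
                simp [pvPreStep] at hpre
                exact hpre.symm
              have hdrain : pvAStep s ')' = [] := by
                rw [hA]
                exact pvAPop_drain s [] s.length hno le_rfl
              have hB : pvBStep ([], last) ')' = ([], last) := by
                simp [pvBStep]
              rw [hdrain, hB, hfs]
              refine ⟨⟨fun c hc => by simp at hc, by decide, by decide⟩, ?_⟩
              intro hcon; exact absurd rfl hcon
        | cons g gs2 =>
          obtain ⟨o, arg, allt, anyt⟩ := g
          cases fs with
          | nil => exact hinv.elim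
          | cons f1 fs1 =>
            obtain ⟨a, np⟩ := f1
            obtain ⟨cs, s', rfl, ho, hno, harg, hall, hany, ha, hnp, hinner⟩ := hinv
            cases fs1 with
            | nil => exact absurd rfl (pvInv_fs_ne gs2 [] s' hinner)
            | cons f2 rest2 =>
              cases np with
              | false =>
                exfalso
                simp [pvPreStep] at hpre
              | true =>
                have hfs : fs' = (true, true) :: rest2 := by
                  simp [pvPreStep] at hpre
                  exact hpre.symm
                have hnpne : pvNP cs ≠ [] := by
                  intro hcon
                  rw [hcon] at hnp
                  simp at hnp
                have hred : pvAStep (cs ++ o :: s') ')' = pvAEval (pvNP cs) o :: s' := by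
                  rw [hA]
                  have h := pvAPop_reduce cs o s' [] (cs ++ o :: s').length hno ho
                    (by simp)
                  rw [List.nil_append] at h
                  exact h
                have hres : pvBRes o arg allt anyt = pvAEval (pvNP cs) o := by
                  unfold pvBRes
                  rw [harg, hall, hany]
                  exact pvRes_eval o cs ho hnpne
                have htf := pvAEval_tf (pvNP cs) o
                have hresnp : (pvAEval (pvNP cs) o == '(') = false := by
                  rcases htf with h | h <;> rw [h] <;> decide
                have hresop : (pvAEval (pvNP cs) o == '!' || pvAEval (pvNP cs) o == '|'
                    || pvAEval (pvNP cs) o == '&') = false := by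
                  rcases htf with h | h <;> rw [h] <;> decide
                rw [hred, hfs, pvBStep_close, hres]
                cases gs2 with
                | nil =>
                  obtain ⟨a2, np2⟩ := f2
                  cases rest2 with
                  | cons f3 rest3 => exact hinner.elim
                  | nil =>
                    obtain ⟨hno2, ha2, hnp2⟩ := hinner
                    constructor
                    · refine ⟨?_, by simp, ?_⟩
                      · intro c hc
                        rcases List.mem_cons.1 hc with rfl | hc
                        · exact hresop
                        · exact hno2 c hc
                      · rw [pvNP_cons_nopar _ _ hresnp]
                        simp
                    · intro _
                      rfl
                | cons g2 gs3 =>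
                  obtain ⟨o2, arg2, all2, any2⟩ := g2
                  obtain ⟨a2, np2⟩ := f2
                  obtain ⟨cs2, s1, rfl, ho2, hno2, harg2, hall2, hany2, ha2, hnp2, hinner2⟩ :=
                    hinner
                  constructor
                  · refine ⟨pvAEval (pvNP cs) o :: cs2, s1, by simp, ho2, ?_, ?_, ?_, ?_,
                      by simp, ?_, hinner2⟩
                    · intro c hc
                      rcases List.mem_cons.1 hc with rfl | hc
                      · exact hresop
                      · exact hno2 c hc
                    · rw [pvNP_cons_nopar _ _ hresnp]
                      simp
                    · rw [pvNP_cons_nopar _ _ hresnp, List.all_cons, hall2, Bool.and_comm]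
                    · rw [pvNP_cons_nopar _ _ hresnp, List.any_cons, hany2, Bool.or_comm]
                    · rw [pvNP_cons_nopar _ _ hresnp]
                      simp
                  · intro _
                    rfl
      · -- an ordinary character (possibly '(') is pushed
        have hcm' : (ch == ',') = false := by revert hcm; cases ch == ',' <;> simp
        have hop' : (ch == '!' || ch == '&' || ch == '|') = false := by
          revert hop; cases ch == '!' || ch == '&' || ch == '|' <;> simp
        have hcl' : (ch == ')') = false := by revert hcl; cases ch == ')' <;> simp
        have hA : pvAStep s ch = ch :: s := by
          simp [pvAStep, hcl', hcm']
        have hchop : (ch == '!' || ch == '|' || ch == '&') = false := by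
          revert hop'; cases h1 : ch == '!' <;> cases h2 : ch == '&' <;>
            cases h3 : ch == '|' <;> simp
        rw [hA, pvBStep_push gs last ch hcm' hop' hcl']
        cases gs with
        | nil =>
          cases fs with
          | nil => exact hinv.elim
          | cons f1 fs1 =>
            obtain ⟨a, np⟩ := f1
            cases fs1 with
            | cons f2 fs2 => exact hinv.elim
            | nil =>
              obtain ⟨hno, ha, hnp⟩ := hinv
              have hfs : fs' = [(true, np || !(ch == '('))] := by
                simp [pvPreStep, hcm', hop', hcl'] at hpre
                exact hpre.symm
              rw [hfs]
              have hindep : pvInv [] [(true, np || !(ch == '('))] (ch :: s) := by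
                refine ⟨?_, by simp, ?_⟩
                · intro c hc
                  rcases List.mem_cons.1 hc with rfl | hc
                  · exact hchop
                  · exact hno c hc
                · by_cases hpar : (ch == '(') = true
                  · obtain rfl := beq_iff_eq.1 hpar
                    rw [pvNP_cons_par]
                    simpa using hnp
                  · have hpar' : (ch == '(') = false := by revert hpar; cases ch == '(' <;> simp
                    rw [pvNP_cons_nopar _ _ hpar', hpar']
                    simp
              by_cases hpar : (ch == '(') = true
              · rw [if_pos hpar]
                exact ⟨hindep, fun _ => rfl⟩
              · rw [if_neg hpar]
                exact ⟨hindep, fun _ => rfl⟩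
        | cons g gs2 =>
          obtain ⟨o, arg, allt, anyt⟩ := g
          cases fs with
          | nil => exact hinv.elim
          | cons f1 fs1 =>
            obtain ⟨a, np⟩ := f1
            obtain ⟨cs, s', rfl, ho, hno, harg, hall, hany, ha, hnp, hinner⟩ := hinv
            have hfs : fs' = (true, np || !(ch == '(')) :: fs1 := by
              simp [pvPreStep, hcm', hop', hcl'] at hpre
              exact hpre.symm
            rw [hfs]
            by_cases hpar : (ch == '(') = true
            · obtain rfl := beq_iff_eq.1 hpar
              rw [if_pos hpar]
              constructor
              · refine ⟨'(' :: cs, s', by simp, ho, ?_, ?_, ?_, ?_, by simp, ?_, hinner⟩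
                · intro c hc
                  rcases List.mem_cons.1 hc with rfl | hc
                  · decide
                  · exact hno c hc
                · rw [pvNP_cons_par]
                  exact harg
                · rw [pvNP_cons_par]
                  exact hall
                · rw [pvNP_cons_par]
                  exact hany
                · rw [pvNP_cons_par, ← hnp]
                  simp
              · intro _
                rfl
            · have hpar' : (ch == '(') = false := by revert hpar; cases ch == '(' <;> simp
              rw [if_neg hpar]
              constructor
              · refine ⟨ch :: cs, s', by simp, ho, ?_, ?_, ?_, ?_, by simp, ?_, hinner⟩
                · intro c hc
                  rcases List.mem_cons.1 hc with rfl | hc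
                  · exact hchop
                  · exact hno c hc
                · rw [pvNP_cons_nopar _ _ hpar']
                  simp
                · rw [pvNP_cons_nopar _ _ hpar', List.all_cons, hall, Bool.and_comm]
                · rw [pvNP_cons_nopar _ _ hpar', List.any_cons, hany, Bool.or_comm]
                · rw [pvNP_cons_nopar _ _ hpar', hpar']
                  simp
              · intro _
                rfl

theorem pvInv_fold (l : List Char) : ∀ (gs : List PvGroup) (last : List Char)
    (fs : List (Bool × Bool)) (s : List Char) (fsN : List (Bool × Bool)),
    pvInv gs fs s → (s ≠ [] → last = s.take 1) →
    List.foldl pvPreStep (some fs) l = some fsN →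
    pvInv (List.foldl pvBStep (gs, last) l).1 fsN (List.foldl pvAStep s l) ∧
      (List.foldl pvAStep s l ≠ [] →
        (List.foldl pvBStep (gs, last) l).2 = (List.foldl pvAStep s l).take 1) := by
  induction l with
  | nil =>
    intro gs last fs s fsN hinv hlast hfold
    rw [List.foldl_nil] at hfold
    obtain rfl : fs = fsN := by injection hfold
    exact ⟨hinv, hlast⟩
  | cons c l ih =>
    intro gs last fs s fsN hinv hlast hfold
    rw [List.foldl_cons] at hfold
    cases h1 : pvPreStep (some fs) c with
    | none =>
      rw [h1, pvPreFold_none] at hfold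
      exact absurd hfold (by simp)
    | some fs1 =>
      rw [h1] at hfold
      obtain ⟨hi, hl⟩ := pvStep gs last fs s c fs1 hinv hlast h1
      have hres := ih (pvBStep (gs, last) c).1 (pvBStep (gs, last) c).2 fs1
        (pvAStep s c) fsN hi hl hfold
      simpa using hres

-- ===== VERDICT (by name: the statement is the Claim_ definition above) =====
theorem parseBoolean_spec : Claim_equal_parseBoolean := by
  intro expression _ hpre
  unfold Spec_parseBoolean parseBoolean parseBoolean_alt
  unfold Pre_parseBoolean pvPreOk at hpre
  cases hfold : expression.toList.foldl pvPreStep (some [(false, false)]) with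
  | none => rw [hfold] at hpre; exact absurd hpre (by simp)
  | some fsN =>
    rw [hfold] at hpre
    have hinit : pvInv [] [(false, false)] [] := by
      refine ⟨?_, rfl, rfl⟩
      intro c hc
      simp at hc
    obtain ⟨hI, hL⟩ := pvInv_fold expression.toList [] [] [(false, false)] [] fsN hinit
      (fun h => absurd rfl h) hfold
    cases fsN with
    | nil => exact absurd hpre (by simp)
    | cons f rest =>
      obtain ⟨a, np⟩ := f
      -- the final stack is nonempty
      have hne : expression.toList.foldl pvAStep [] ≠ [] := by
        cases hgs : (expression.toList.foldl pvBStep ([], [])).1 with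
        | nil =>
          rw [hgs] at hI
          cases rest with
          | cons f2 rest2 => exact hI.elim
          | nil =>
            obtain ⟨_, ha, _⟩ := hI
            simp only [List.isEmpty_nil, Bool.not_true, Bool.false_or] at hpre
            rw [hpre] at ha
            intro hcon
            rw [hcon] at ha
            simp at ha
        | cons g gs2 =>
          rw [hgs] at hI
          obtain ⟨o, arg, allt, anyt⟩ := g
          obtain ⟨cs, s', heq, _⟩ := hI
          rw [heq]
          simp
      obtain ⟨c, s0, hs⟩ := List.exists_cons_of_ne_nil hne
      have hl := hL hne
      rw [hs] at hl
      simp only [List.take_succ_cons, List.take_zero] at hl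
      show pvAOut (expression.toList.foldl pvAStep [])
        = ((expression.toList.foldl pvBStep ([], [])).2 == ['t'])
      rw [hs, hl]
      unfold pvAOut
      cases hc : c == 't' <;> simp_all
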